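-- pv_equiv track=rewrite | github.com/MichaelPay/michael_learns_python | Py Programs/double_digit_counter.py | double_digit_counter
-- ===== SOURCE A (Python) =====
-- def double_digit_counter(number):
--     counter = 0  # function starts with the count 0
--     last_digit = None  # last_digit variable uses None
--     for digit in str(number):  # the int input is converted into a string and iterated "digit by digit" in a for loop.
--         if digit == last_digit:  # compares the current digit to see if it's the same as the last digit
--             counter += 1  # if it is, meaning there's a double, the counter goes up by 1
--         last_digit = digit  # set the last digit variable to the current digit before continuing with the loop.
--     return counter  # returns the integer count of duplicates.
-- ===== SOURCE B (Python) =====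
-- def double_digit_counter(number):
--     # Two-pointer run skipper: outer loop jumps from run start to run start,
--     # inner loop extends the current run; a run spanning [i, j) adds j-i-1 pairs.
--     s = str(number)
--     n = len(s)
--     total = 0
--     i = 0
--     while i < n:
--         j = i + 1
--         while j < n and s[j] == s[i]:
--             j += 1
--         total += j - i - 1
--         i = j
--     return total
-- ===== Notes on version B (the rewrite author's own statement) =====
-- stated objective: alternative
-- what changed: B replaces A's single pass comparing each digit with the previous one by a two-pointer run skipper: an outer loop jumps from run start to run start, an inner loop extends each maximal run of equal digits against its first character, and each run of length L contributes L-1.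
import Mathlib
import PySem

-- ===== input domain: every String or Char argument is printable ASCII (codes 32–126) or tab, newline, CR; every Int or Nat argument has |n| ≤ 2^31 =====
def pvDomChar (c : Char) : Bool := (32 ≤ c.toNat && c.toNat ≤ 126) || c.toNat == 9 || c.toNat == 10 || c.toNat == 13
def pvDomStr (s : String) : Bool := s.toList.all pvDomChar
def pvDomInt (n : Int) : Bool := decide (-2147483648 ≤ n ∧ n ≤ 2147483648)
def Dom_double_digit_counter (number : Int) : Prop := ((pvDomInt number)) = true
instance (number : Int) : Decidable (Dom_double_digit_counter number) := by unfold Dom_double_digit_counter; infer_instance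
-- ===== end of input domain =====

-- B replaces A's previous-digit comparison pass by a two-pointer run skipper (outer loop over maximal runs, inner loop extending each run); objective: alternative, same cost.

-- ===== PORT A =====
-- A's loop: carries (last_digit, counter) over the characters of str(number)
def ddcLoopA : List Char → Option Char → Int → Int
  | [], _, counter => counter
  | d :: rest, last, counter =>
      ddcLoopA rest (some d) (if some d = last then counter + 1 else counter)

def double_digit_counter (number : Int) : Int :=
  ddcLoopA (PySem.Int.toStr number).toList none 0

-- ===== PORT B =====
-- B's outer while loop over run starts: the inner while 's[j] == s[i]' is the
-- takeWhile (· == c) extension of the run; the run adds its length minus one,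
-- and the outer index jumps past the run (dropWhile).
def ddcRunsB : List Char → Int
  | [] => 0
  | c :: rest =>
      ((rest.takeWhile (· == c)).length : Int) + ddcRunsB (rest.dropWhile (· == c))
termination_by l => l.length
decreasing_by
  exact Nat.lt_succ_of_le (List.length_dropWhile_le _ _)

def double_digit_counter_alt (number : Int) : Int :=
  ddcRunsB (PySem.Int.toStr number).toList

-- ===== PRECONDITION & SPEC =====
def Spec_double_digit_counter (number : Int) (out : Int) : Prop := out = double_digit_counter_alt number
instance (number : Int) (out : Int) : Decidable (Spec_double_digit_counter number out) := by unfold Spec_double_digit_counter; infer_instance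

-- ===== CLAIM (what is proved, stated in full; the proofs are below) =====
def Claim_equal_double_digit_counter : Prop := ∀ (number : Int), Dom_double_digit_counter number → Spec_double_digit_counter number (double_digit_counter number)

-- ===== LEMMAS AND PROOFS =====

theorem ddcRunsB_nil : ddcRunsB [] = 0 := by rw [ddcRunsB]

theorem ddcRunsB_cons (c : Char) (rest : List Char) :
    ddcRunsB (c :: rest) =
      ((rest.takeWhile (· == c)).length : Int) + ddcRunsB (rest.dropWhile (· == c)) := by
  rw [ddcRunsB]

-- B's run count satisfies the step equation of a pairwise adjacent-equal count
theorem ddcRunsB_cons_cons (d e : Char) (r : List Char) :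
    ddcRunsB (d :: e :: r) = (if e = d then 1 else 0) + ddcRunsB (e :: r) := by
  by_cases h : e = d
  · subst h
    rw [ddcRunsB_cons, ddcRunsB_cons e r]
    simp only [List.takeWhile, List.dropWhile, beq_self_eq_true, List.length_cons]
    split_ifs <;> push_cast <;> ring
  · have hb : (e == d) = false := beq_false_of_ne h
    rw [ddcRunsB_cons]
    simp [List.takeWhile, List.dropWhile, hb, h]

-- A's loop after the first digit equals B's run count on the tail prefixed by it
theorem ddc_loop_eq_runs (l : List Char) (d : Char) (c : Int) :
    ddcLoopA l (some d) c = c + ddcRunsB (d :: l) := by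
  induction l generalizing d c with
  | nil => simp [ddcLoopA, ddcRunsB_cons, ddcRunsB_nil]
  | cons e r ih =>
    rw [ddcRunsB_cons_cons]
    by_cases h : e = d
    · subst h
      simp only [ddcLoopA, ih]
      split_ifs <;> ring
    · have h1 : ¬ (some e = some d) := by simpa using h
      simp only [ddcLoopA, if_neg h1, ih, if_neg h]
      ring

-- ===== VERDICT (by name: the statement is the Claim_ definition above) =====
theorem double_digit_counter_spec : Claim_equal_double_digit_counter := by
  intro number _
  unfold Spec_double_digit_counter double_digit_counter double_digit_counter_alt
  cases hs : (PySem.Int.toStr number).toList with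
  | nil => simp [ddcLoopA, ddcRunsB_nil]
  | cons d rest =>
    simp only [ddcLoopA, reduceCtorEq, if_false, ddc_loop_eq_runs, zero_add]
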